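-- pv_equiv track=rewrite | github.com/Ben-Drucker/UCONN-REU-Combinatorics-Utilities | Generating Function.py | backward_ss
-- ===== SOURCE A (Python) =====
-- def BBS_move(old_state):
--     # takes a list containing the integers 1-n (as well as an
--     # unspecified # of zeroes) and preforms a "Fukuda" BBS move on it
--
--     state = []
--     for elt in old_state:
--         state.append(elt)
--
--     # naive method of preforming a move, runs in cubic? time
--     # still fast enough for relatively small permuations
--     n = max(state)
--     for i in range(1,n+1):
--         # checks the location of each integer 1-n
--         j = state.index(i)
--         # if there is a zero to the right of i, preform a swap
--         if 0 in state[j+1:]: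
--             k = state[j+1:].index(0)
--             state[j], state[k+j+1] = state[k+j+1], state[j]
--         # otherwise, stick i on the end of the list and put a zero where i was
--         else:
--             state.append(i)
--             state[j] = 0
--
--     return state
--
-- def BBS(arrangement, t):
--     if t >= 0:
--         system = [arrangement]
--         for move in range(t):
--             step = BBS_move(system[move])
--             system.append(step)
--         # THIS IS DIFFERENT FROM WHAT BBS FUNCTION RETURNS IN bbs_system.py
--         # RETURNS ALL CONFIGS FOR times 0,1,...,t
--         return system
--
--     system = [arrangement]
--     for move in range(-t):
--         step = backward_move(system[move])
--         system.append(step)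
--     return system
--
-- def backward_ss(pi):
--     # make n backward moves, see what time we reach a steady state
--
--     perm = list(pi)
--     n = max(perm)
--     # a list where the ith index is the config at t = -i
--     sys = BBS(perm, -n)
--
--     steady = []
--     for elt in sys[n]:
--         if elt != 0:
--             steady.append(elt)
--
--     for t in range(n + 1):
--         cur = []
--         for elt in sys[t]:
--             if elt != 0:
--                 cur.append(elt)
--             if cur == steady:
--                 return -t
--
-- def backward_move(old_state):
--     # reverse and complement
--     n = max(old_state)
--     state = []
--     for elt in old_state[::-1]:
--         if elt == 0:
--             state.append(elt)
--         else:
--             state.append(n + 1 - elt)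
--
--     # preform a BBS move on the reversed complement and then return
--     # the reversed complement of that
--     mid_state = BBS_move(state)
--     new_state = []
--     for elt in mid_state[::-1]:
--         if elt == 0:
--             new_state.append(elt)
--         else:
--             new_state.append(n + 1 - elt)
--
--     return new_state
-- ===== SOURCE B (Python) =====
-- def backward_ss(pi):
--     # One backward move of a configuration is the reverse-complement of one
--     # FORWARD BBS move of its reverse-complement (that is literally how
--     # backward_move is defined), and reverse-complement is an involution.
--     # So instead of simulating backward moves (3 passes per step) and then
--     # re-scanning every stored configuration against the steady word, run the
--     # forward system once on the conjugate configuration and hash each nonzero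
--     # word to the first time it appears: the answer is minus the first time
--     # the final (steady) word occurred.
--     n = max(pi)
--     z = [0 if e == 0 else n + 1 - e for e in reversed(pi)]
--     first_seen = {}
--     for t in range(n + 1):
--         w = tuple(e for e in z if e != 0)
--         if w not in first_seen:
--             first_seen[w] = t
--         if t < n:
--             z = _forward_move(z)
--     return -first_seen[w]
--
--
-- def _forward_move(state):
--     # forward BBS move: each value i = 1..n jumps to the first zero to its
--     # right, found together with i's position in a single left-to-right scan
--     state = list(state)
--     n = max(state)
--     for i in range(1, n + 1):
--         j = -1
--         k = -1
--         for idx in range(len(state)):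
--             e = state[idx]
--             if j < 0:
--                 if e == i:
--                     j = idx
--             elif e == 0:
--                 k = idx
--                 break
--         if j < 0:
--             raise ValueError(f"{i} is not in list")
--         if k >= 0:
--             state[k] = state[j]
--             state[j] = 0
--         else:
--             state[j] = 0
--             state.append(i)
--     return state
-- ===== Notes on version B (the rewrite author's own statement) =====
-- stated objective: alternative
-- what changed: A simulates n backward moves (each = reverse-complement, forward BBS move, reverse-complement again) storing every configuration and then rescans each stored configuration element by element against the steady word; B conjugates once, runs the plain FORWARD box-ball system on the reverse-complement, and hashes each configuration's nonzero word to the first time it appears, so the answer is one dictionary lookup of the final word instead of A's per-configuration rebuild-and-compare scan.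
-- outside the precondition, e.g. on backward_ss([-1, -7531]): A returns None, B raises UnboundLocalError
import Mathlib
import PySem

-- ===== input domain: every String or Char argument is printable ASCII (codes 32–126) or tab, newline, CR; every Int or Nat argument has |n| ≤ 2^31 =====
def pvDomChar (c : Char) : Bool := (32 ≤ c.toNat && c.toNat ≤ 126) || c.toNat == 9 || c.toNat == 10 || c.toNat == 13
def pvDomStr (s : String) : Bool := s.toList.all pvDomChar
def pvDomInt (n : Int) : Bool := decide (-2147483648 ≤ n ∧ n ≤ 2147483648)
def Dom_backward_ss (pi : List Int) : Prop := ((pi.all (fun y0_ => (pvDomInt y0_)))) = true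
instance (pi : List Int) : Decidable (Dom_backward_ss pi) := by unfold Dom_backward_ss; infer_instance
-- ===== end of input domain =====

-- B works in the conjugate picture: one backward move is the reverse-complement of one
-- forward BBS move of the reverse-complement, so B runs the forward system once on the
-- conjugate and hashes each nonzero word to its first time, instead of simulating
-- backward moves and rescanning every stored configuration (objective: alternative).
-- Return-value equivalence only: neither program mutates the caller's list.

-- ===== PORT A =====

-- one iteration of BBS_move's `for i in range(1, n+1)` body
def aStep (state : List Int) (i : Int) : List Int :=
  match PySem.List.index? state i with
  | none => state               -- Python: `state.index(i)` raises ValueError here (outside Pre_)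
  | some j =>
    let tail := PySem.List.slice state (some ((j : Int) + 1)) none   -- state[j+1:]
    if tail.contains 0 then
      match PySem.List.index? tail 0 with
      | none => state           -- unreachable: guarded by `0 in state[j+1:]`
      | some k =>
        -- state[j], state[k+j+1] = state[k+j+1], state[j]
        let a := state.getD (k + j + 1) 0   -- indices are in range by construction
        let b := state.getD j 0
        (state.set j a).set (k + j + 1) b
    else
      (state ++ [i]).set j 0    -- state.append(i); state[j] = 0

def bbsMoveA (old_state : List Int) : List Int :=
  let state := old_state.foldl (fun s e => s ++ [e]) []   -- the element-wise copy loop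
  match PySem.List.max? state (fun y => y) with
  | none => state               -- Python: max([]) raises ValueError (outside Pre_)
  | some n => (PySem.List.pyRange 1 (n + 1) 1).foldl aStep state

-- the reverse-and-complement loop of backward_move (old_state[::-1] is reverse)
def compRevA (n : Int) (xs : List Int) : List Int :=
  xs.reverse.foldl (fun s e => s ++ [if e = 0 then e else n + 1 - e]) []

def bmA (old_state : List Int) : List Int :=
  match PySem.List.max? old_state (fun y => y) with
  | none => old_state           -- Python: max([]) raises ValueError (outside Pre_)
  | some n =>
    let state := compRevA n old_state
    let mid_state := bbsMoveA state
    compRevA n mid_state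

def bbsA (arrangement : List Int) (t : Int) : List (List Int) :=
  if 0 ≤ t then
    (PySem.List.pyRange 0 t 1).foldl
      (fun sys move => sys ++ [bbsMoveA ((PySem.List.pyGet? sys move).getD [])]) [arrangement]
  else
    (PySem.List.pyRange 0 (-t) 1).foldl
      (fun sys move => sys ++ [bmA ((PySem.List.pyGet? sys move).getD [])]) [arrangement]

-- the inner `for elt in sys[t]` loop: does it hit `cur == steady` (early return)?
def scanA (steady : List Int) : List Int → List Int → Bool
  | [], _ => false
  | e :: rest, cur =>
    let cur' := if e ≠ 0 then cur ++ [e] else cur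
    if cur' = steady then true else scanA steady rest cur'

-- the `for t in range(n+1)` loop with its early `return -t`
def tLoopA (sys : List (List Int)) (steady : List Int) : List Int → Option Int
  | [] => none
  | t :: rest =>
    if scanA steady ((PySem.List.pyGet? sys t).getD []) [] then some (-t)
    else tLoopA sys steady rest

def backward_ss (pi : List Int) : Int :=
  match PySem.List.max? pi (fun y => y) with
  | none => 0                   -- Python: max([]) raises ValueError (outside Pre_)
  | some n =>
    let sys := bbsA pi (-n)
    let steadySrc := (PySem.List.pyGet? sys n).getD []
    let steady := steadySrc.foldl (fun acc e => if e ≠ 0 then acc ++ [e] else acc) []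
    ((tLoopA sys steady (PySem.List.pyRange 0 (n + 1) 1)).getD 0)
    -- Python returns None if the loop falls through (outside Pre_): ported as 0

-- ===== PORT B =====

-- the single scan of _forward_move: j = position of i (or -1), k = first zero after it (or -1)
def scanJK (i : Int) : List Int → Nat → Option Nat → Option Nat × Option Nat
  | [], _, j => (j, none)
  | e :: rest, idx, none => scanJK i rest (idx + 1) (if e = i then some idx else none)
  | e :: rest, idx, some j => if e = 0 then (some j, some idx) else scanJK i rest (idx + 1) (some j)

def bStep (state : List Int) (i : Int) : List Int :=
  match scanJK i state 0 none with
  | (none, _) => state                                            -- Python: raise ValueError here (outside Pre_)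
  | (some j, some k) => (state.set k (state.getD j 0)).set j 0    -- state[k] = state[j]; state[j] = 0
  | (some j, none) => (state.set j 0) ++ [i]                      -- state[j] = 0; state.append(i)

def moveB (state : List Int) : List Int :=
  match PySem.List.max? state (fun y => y) with
  | none => state               -- Python: max([]) raises ValueError (outside Pre_)
  | some n => (PySem.List.pyRange 1 (n + 1) 1).foldl bStep state

def backward_ss_alt (pi : List Int) : Int :=
  match PySem.List.max? pi (fun y => y) with
  | none => 0                   -- Python: max([]) raises ValueError (outside Pre_)
  | some n =>
    let z0 := pi.reverse.map (fun e => if e = 0 then e else n + 1 - e)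
    let p := ((PySem.List.pyRange 0 (n + 1) 1).foldl
      (fun (s : List Int × PySem.Dict (List Int) Int × List Int) t =>
        let w := s.1.filter (fun e => decide (e ≠ 0))
        let d := if (PySem.Dict.get? s.2.1 w).isSome then s.2.1
                 else PySem.Dict.insert s.2.1 w t
        let z := if t < n then moveB s.1 else s.1
        (z, d, w))
      (z0, PySem.Dict.empty, []))
    match PySem.Dict.get? p.2.1 p.2.2 with
    | some r => -r
    | none => 0   -- Python: KeyError; unreachable, the key was inserted no later than t = n

-- ===== PRECONDITION & SPEC =====

-- Pre_ admits exactly the inputs on which the Python A returns an int: it excludes the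
-- empty list and all-negative lists (max < 0: A's final loop falls through and returns
-- None), and lists that mix negatives with a positive or whose set of positive values
-- is not upward-closed below the maximum, where some BBS step's `state.index` raises
-- ValueError.
def Pre_backward_ss (pi : List Int) : Prop :=
  pi ≠ [] ∧ (∃ e ∈ pi, 0 ≤ e) ∧
  ((∃ e ∈ pi, 0 < e) → (∀ e ∈ pi, 0 ≤ e)) ∧
  (∀ e ∈ pi, ∀ e' ∈ pi, 0 < e → e < e' → (e + 1) ∈ pi)
instance (pi : List Int) : Decidable (Pre_backward_ss pi) := by
  unfold Pre_backward_ss; infer_instance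

def pvWitness_backward_ss : List Int := [2, 0, 1, 0]

def Spec_backward_ss (pi : List Int) (out : Int) : Prop := out = backward_ss_alt pi
instance (pi : List Int) (out : Int) : Decidable (Spec_backward_ss pi out) := by
  unfold Spec_backward_ss; infer_instance

-- ===== CLAIM (what is proved, stated in full; the proofs are below) =====
def Claim_equal_backward_ss : Prop :=
  ∀ (pi : List Int), Dom_backward_ss pi → Pre_backward_ss pi → Spec_backward_ss pi (backward_ss pi)

-- ===== LEMMAS AND PROOFS =====

-- complement map and conjugation (reverse-complement), proof-side helpers
def fC (n e : Int) : Int := if e = 0 then e else n + 1 - e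
def conj (n : Int) (xs : List Int) : List Int := xs.reverse.map (fC n)
def nzw (xs : List Int) : List Int := xs.filter (fun e => decide (e ≠ 0))
def Bnd (n : Int) (xs : List Int) : Prop := ∀ e ∈ xs, 0 ≤ e ∧ e ≤ n

-- ----- B's single scan equals A's index()/slice computations (step_eq) -----

theorem scanJK_some (i : Int) (xs : List Int) : ∀ (idx j0 : Nat),
    scanJK i xs idx (some j0) =
      (some j0, (PySem.List.index? xs 0).map (fun k => idx + k)) := by
  induction xs with
  | nil => intro idx j0; simp [scanJK, PySem.List.index?_eq_idxOf?, List.idxOf?]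
  | cons e rest ih =>
    intro idx j0
    by_cases he : e = 0
    · subst he
      rw [PySem.List.index?_cons_self]
      simp [scanJK]
    · rw [PySem.List.index?_cons_of_ne rest he]
      simp only [scanJK, if_neg he, ih (idx + 1) j0]
      cases hidx : PySem.List.index? rest 0 <;> simp <;> omega

theorem scanJK_none (i : Int) (xs : List Int) : ∀ (idx : Nat),
    scanJK i xs idx none =
      match PySem.List.index? xs i with
      | none => (none, none)
      | some j => (some (idx + j),
          (PySem.List.index? (xs.drop (j + 1)) 0).map (fun k => idx + j + 1 + k)) := by
  induction xs with
  | nil => intro idx; simp [scanJK, PySem.List.index?_eq_idxOf?, List.idxOf?]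
  | cons e rest ih =>
    intro idx
    by_cases he : e = i
    · subst he
      rw [PySem.List.index?_cons_self]
      simp only [scanJK, eq_self_iff_true, if_true]
      rw [scanJK_some]
      simp
    · rw [PySem.List.index?_cons_of_ne rest he]
      simp only [scanJK, if_neg he, ih (idx + 1)]
      cases hidx : PySem.List.index? rest i
      · simp
      · rename_i j
        simp only [Option.map_some, List.drop_succ_cons]
        rw [Prod.mk.injEq]
        refine ⟨by simp; omega, ?_⟩
        congr 1
        funext k; omega

theorem step_eq (state : List Int) (i : Int) : aStep state i = bStep state i := by
  unfold aStep bStep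
  rw [scanJK_none]
  cases hj : PySem.List.index? state i with
  | none => rfl
  | some j =>
    obtain ⟨hjlt, -, -⟩ := PySem.List.getElem_of_index?_eq_some hj
    have hslice : PySem.List.slice state (some ((j : Int) + 1)) none = state.drop (j + 1) := by
      have hc : ((j : Int) + 1) = ((j + 1 : Nat) : Int) := by push_cast; ring
      rw [hc, PySem.List.slice_from_natCast]
    dsimp only
    rw [hslice]
    cases hk : PySem.List.index? (state.drop (j + 1)) 0 with
    | none =>
      have hmem : (0 : Int) ∉ state.drop (j + 1) :=
        (PySem.List.index?_eq_none_iff _ _).mp hk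
      rw [if_neg (by simp [hmem])]
      simp only [Option.map_none, Nat.zero_add]
      exact List.set_append_left j 0 hjlt
    | some k =>
      obtain ⟨hklt, hk0, -⟩ := PySem.List.getElem_of_index?_eq_some hk
      have hmem : (0 : Int) ∈ state.drop (j + 1) := by
        rw [← hk0]; exact List.getElem_mem hklt
      have hct : (List.drop (j + 1) state).contains 0 = true := by
        simpa using hmem
      rw [if_pos hct]
      dsimp only
      have hgd : state.getD (k + j + 1) 0 = 0 := by
        have hlen : k + j + 1 < state.length := by
          have := hklt; simp only [List.length_drop] at this; omega
        rw [List.getD_eq_getElem state 0 hlen, ← hk0, List.getElem_drop]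
        congr 1; omega
      rw [hgd]
      show (state.set j 0).set (k + j + 1) (state.getD j 0) =
        (state.set (0 + j + 1 + k) (state.getD (0 + j) 0)).set (0 + j) 0
      have e1 : 0 + j + 1 + k = k + j + 1 := by omega
      have e2 : 0 + j = j := by omega
      rw [e1, e2, List.set_comm _ _ (show j ≠ k + j + 1 by omega)]

theorem move_eq (state : List Int) :
    (match PySem.List.max? state (fun y => y) with
     | none => state
     | some n => (PySem.List.pyRange 1 (n + 1) 1).foldl aStep state) = moveB state := by
  unfold moveB
  cases PySem.List.max? state (fun y => y) with
  | none => rfl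
  | some n =>
    exact PySem.List.foldl_congr_mem _ _ _ _ (fun acc x _ => step_eq acc x)

theorem bbsMoveA_eq (old_state : List Int) : bbsMoveA old_state = moveB old_state := by
  unfold bbsMoveA
  rw [show old_state.foldl (fun s e => s ++ [e]) [] = old_state by
    simpa using PySem.List.foldl_append_singleton_eq_self old_state []]
  exact move_eq old_state

theorem compRevA_eq_conj (n : Int) (xs : List Int) : compRevA n xs = conj n xs := by
  unfold compRevA conj fC
  simpa using PySem.List.foldl_append_singleton_eq_map
    (fun e => if e = 0 then e else n + 1 - e) xs.reverse []

theorem bmA_eq (x : List Int) : bmA x =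
    match PySem.List.max? x (fun y => y) with
    | none => x
    | some n => conj n (moveB (conj n x)) := by
  unfold bmA
  cases PySem.List.max? x (fun y => y) with
  | none => rfl
  | some n =>
    dsimp only
    rw [compRevA_eq_conj, bbsMoveA_eq, compRevA_eq_conj]

-- ----- counting: one bStep preserves the count of every nonzero value -----

theorem count_set_add (l : List Int) (j : Nat) (a v : Int) (h : j < l.length) :
    (l.set j a).count v + (if l[j] = v then 1 else 0) =
      l.count v + (if a = v then 1 else 0) := by
  rw [List.set_eq_take_cons_drop a h]
  conv_rhs => rw [show l = l.take j ++ l[j] :: l.drop (j + 1) by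
    rw [List.getElem_cons_drop h, List.take_append_drop]]
  simp only [List.count_append, List.count_cons]
  split_ifs <;> simp_all <;> omega

theorem bStep_count (s : List Int) (i v : Int) (hv : v ≠ 0) (hi : i ≠ 0) :
    (bStep s i).count v = s.count v := by
  unfold bStep
  rw [scanJK_none]
  cases hj : PySem.List.index? s i with
  | none => rfl
  | some j =>
    obtain ⟨hjlt, hsj, -⟩ := PySem.List.getElem_of_index?_eq_some hj
    dsimp only
    cases hk : PySem.List.index? (s.drop (j + 1)) 0 with
    | none =>
      simp only [Option.map_none]
      have h0j : 0 + j = j := by omega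
      rw [h0j, List.count_append]
      have hset := count_set_add s j 0 v hjlt
      have hsingle : List.count v [i] = if i = v then 1 else 0 := by
        rw [List.count_cons, List.count_nil]
        by_cases h : i = v <;> simp [h]
      rw [hsingle]
      rw [hsj] at hset
      split_ifs at hset ⊢ <;> omega
    | some k =>
      obtain ⟨hklt, hk0, -⟩ := PySem.List.getElem_of_index?_eq_some hk
      simp only [Option.map_some]
      have h0j : 0 + j = j := by omega
      rw [h0j]
      have hKlt : j + 1 + k < s.length := by
        have := hklt; simp only [List.length_drop] at this; omega
      have hsK : s[j + 1 + k]'hKlt = 0 := by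
        rw [← hk0, List.getElem_drop]
      have hgd : s.getD j 0 = i := by
        rw [List.getD_eq_getElem s 0 hjlt, hsj]
      rw [hgd]
      have h1 := count_set_add s (j + 1 + k) i v hKlt
      have hlen1 : j < (s.set (j + 1 + k) i).length := by simpa using hjlt
      have h2 := count_set_add (s.set (j + 1 + k) i) j 0 v hlen1
      have hsame : (s.set (j + 1 + k) i)[j]'hlen1 = i := by
        rw [List.getElem_set_ne (by omega), hsj]
      rw [hsame] at h2
      rw [hsK] at h1
      split_ifs at h1 h2 ⊢ <;> omega

theorem bStep_bnd (s : List Int) (i n : Int) (hb : Bnd n s) (h1 : 1 ≤ i) (h2 : i ≤ n) :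
    Bnd n (bStep s i) := by
  have hn : (0 : Int) ≤ n := by omega
  unfold bStep
  cases hres : scanJK i s 0 none with
  | mk oj ok =>
    cases oj with
    | none => exact hb
    | some j =>
      cases ok with
      | some k =>
        intro e he
        rcases List.mem_or_eq_of_mem_set he with he' | he'
        · rcases List.mem_or_eq_of_mem_set he' with he'' | he''
          · exact hb e he''
          · subst he''
            by_cases hjl : j < s.length
            · have : s.getD j 0 ∈ s := by
                rw [List.getD_eq_getElem s 0 hjl]; exact List.getElem_mem hjl
              exact hb _ this
            · rw [List.getD_eq_default _ _ (by omega)]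
              exact ⟨le_refl 0, hn⟩
        · subst he'; exact ⟨le_refl 0, hn⟩
      | none =>
        intro e he
        rcases List.mem_append.mp he with he' | he'
        · rcases List.mem_or_eq_of_mem_set he' with he'' | he''
          · exact hb e he''
          · subst he''; exact ⟨le_refl 0, hn⟩
        · have : e = i := by simpa using he'
          subst this; exact ⟨by omega, h2⟩

theorem foldl_bStep_count (v : Int) (hv : v ≠ 0) : ∀ (l : List Int) (s : List Int),
    (∀ i ∈ l, i ≠ 0) → (l.foldl bStep s).count v = s.count v := by
  intro l
  induction l with
  | nil => intro s _; rfl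
  | cons i rest ih =>
    intro s h
    rw [List.foldl_cons, ih (bStep s i) (fun x hx => h x (by simp [hx])),
      bStep_count s i v hv (h i (by simp))]

theorem moveB_count (s : List Int) (v : Int) (hv : v ≠ 0) :
    (moveB s).count v = s.count v := by
  unfold moveB
  cases PySem.List.max? s (fun y => y) with
  | none => rfl
  | some n =>
    exact foldl_bStep_count v hv _ s
      (fun i hi => by
        have := (PySem.List.mem_pyRange_one).mp hi
        omega)

theorem foldl_bStep_bnd (n : Int) : ∀ (l : List Int) (s : List Int),
    (∀ i ∈ l, 1 ≤ i ∧ i ≤ n) → Bnd n s → Bnd n (l.foldl bStep s) := by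
  intro l
  induction l with
  | nil => intro s _ hb; exact hb
  | cons i rest ih =>
    intro s h hb
    exact ih (bStep s i) (fun x hx => h x (by simp [hx]))
      (bStep_bnd s i n hb (h i (by simp)).1 (h i (by simp)).2)

theorem moveB_bnd (s : List Int) (n : Int) (hb : Bnd n s) : Bnd n (moveB s) := by
  unfold moveB
  cases hm : PySem.List.max? s (fun y => y) with
  | none => exact hb
  | some n' =>
    have hn' : n' ≤ n := (hb n' (PySem.List.max?_mem hm)).2
    exact foldl_bStep_bnd n _ s
      (fun i hi => by
        have := (PySem.List.mem_pyRange_one).mp hi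
        omega) hb

-- ----- conjugation facts -----

theorem conj_conj (n : Int) (xs : List Int) (hb : Bnd n xs) : conj n (conj n xs) = xs := by
  unfold conj
  rw [show (List.map (fC n) xs.reverse).reverse = List.map (fC n) xs by
    rw [← List.map_reverse, List.reverse_reverse]]
  rw [List.map_map]
  have : ∀ e ∈ xs, (fC n ∘ fC n) e = id e := by
    intro e he
    obtain ⟨h0, h1⟩ := hb e he
    simp only [Function.comp_apply, fC, id]
    by_cases h : e = 0
    · simp [h]
    · rw [if_neg h, if_neg (by omega)]
      ring
  rw [List.map_congr_left this, List.map_id]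

theorem conj_bnd (n : Int) (xs : List Int) (hb : Bnd n xs) : Bnd n (conj n xs) := by
  intro e he
  unfold conj at he
  obtain ⟨x, hx, rfl⟩ := List.mem_map.mp he
  obtain ⟨h0, h1⟩ := hb x (List.mem_reverse.mp hx)
  unfold fC
  by_cases h : x = 0
  · simp [h]; omega
  · rw [if_neg h]; omega

theorem nzw_conj (n : Int) (xs : List Int) (hb : Bnd n xs) :
    nzw (conj n xs) = (nzw xs).reverse.map (fC n) := by
  unfold nzw conj
  rw [List.filter_map, ← List.filter_reverse]
  congr 1
  apply List.filter_congr
  intro e he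
  obtain ⟨h0, h1⟩ := hb e (List.mem_reverse.mp he)
  by_cases h : e = 0
  · simp [fC, h]
  · simp only [Function.comp_apply, fC, if_neg h]
    rw [decide_eq_decide]
    omega

theorem max?_value (xs : List Int) (n : Int) (hmem : n ∈ xs) (hub : ∀ e ∈ xs, e ≤ n) :
    PySem.List.max? xs (fun y => y) = some n := by
  cases hm : PySem.List.max? xs (fun y => y) with
  | none =>
    rw [PySem.List.max?_eq_none_iff] at hm
    subst hm; simp at hmem
  | some m =>
    have h1 : m ∈ xs := PySem.List.max?_mem hm
    have h2 : n ≤ m := PySem.List.max?_isMax hm n hmem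
    have h3 : m ≤ n := hub m h1
    rw [le_antisymm h3 h2]

-- ----- A's iterate list -----

def itListA (x : List Int) (m : Nat) : List (List Int) :=
  (List.range (m + 1)).map (fun k => bmA^[k] x)

theorem itListA_succ (x : List Int) (m : Nat) :
    itListA x (m + 1) = itListA x m ++ [bmA^[m + 1] x] := by
  unfold itListA
  rw [List.range_succ, List.map_append]
  rfl

theorem itListA_get (x : List Int) (m : Nat) : (itListA x m)[m]? = some (bmA^[m] x) := by
  unfold itListA
  rw [List.getElem?_map, List.getElem?_range (by omega)]
  rfl

theorem itListA_length (x : List Int) (m : Nat) : (itListA x m).length = m + 1 := by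
  simp [itListA]

theorem sysA_fold (x : List Int) : ∀ (m : Nat),
    (PySem.List.pyRange 0 (m : Int) 1).foldl
      (fun sys move => sys ++ [bmA ((PySem.List.pyGet? sys move).getD [])]) [x] = itListA x m := by
  intro m
  induction m with
  | zero => simp [PySem.List.pyRange_one_eq_nil, itListA]
  | succ m ih =>
    rw [show ((m + 1 : Nat) : Int) = (m : Int) + 1 by push_cast; ring,
      PySem.List.pyRange_one_succ_right (by positivity), List.foldl_append]
    dsimp only [List.foldl]
    rw [ih, PySem.List.pyGet?_natCast, itListA_get, itListA_succ]
    simp [Function.iterate_succ_apply']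

-- ----- A's scan: hit iff the steady word is the nonzero word -----

theorem nzw_nil : nzw ([] : List Int) = [] := rfl

theorem nzw_cons_zero (rest : List Int) : nzw ((0 : Int) :: rest) = nzw rest := by
  simp [nzw]

theorem nzw_cons_ne (e : Int) (rest : List Int) (h : e ≠ 0) :
    nzw (e :: rest) = e :: nzw rest := by
  simp [nzw, h]

theorem scanA_hit (cfg : List Int) : ∀ (cur : List Int), cfg ≠ [] →
    scanA (cur ++ nzw cfg) cfg cur = true := by
  induction cfg with
  | nil => intro cur h; exact absurd rfl h
  | cons e rest ih =>
    intro cur _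
    show (if (if e ≠ 0 then cur ++ [e] else cur) = cur ++ nzw (e :: rest) then true
          else scanA (cur ++ nzw (e :: rest)) rest (if e ≠ 0 then cur ++ [e] else cur)) = true
    by_cases h : e = 0
    · rw [if_neg (show ¬(e ≠ 0) from fun hh => hh h), h, nzw_cons_zero]
      cases rest with
      | nil => simp [nzw_nil, scanA]
      | cons f rs =>
        split_ifs with hc
        · rfl
        · exact ih cur (by simp)
    · rw [if_pos (show e ≠ 0 from h), nzw_cons_ne e rest h]
      have hassoc : cur ++ e :: nzw rest = (cur ++ [e]) ++ nzw rest := by simp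
      rw [hassoc]
      cases rest with
      | nil => simp [nzw_nil, scanA]
      | cons f rs =>
        split_ifs with hc
        · rfl
        · exact ih (cur ++ [e]) (by simp)

theorem scanA_prefix (steady : List Int) (cfg : List Int) : ∀ (cur : List Int),
    scanA steady cfg cur = true → ∃ p, cur ++ p = steady ∧ p <+: nzw cfg := by
  induction cfg with
  | nil => intro cur h; exact absurd h (by simp [scanA])
  | cons e rest ih =>
    intro cur h
    have hstep : scanA steady (e :: rest) cur =
        (if (if e ≠ 0 then cur ++ [e] else cur) = steady then true
         else scanA steady rest (if e ≠ 0 then cur ++ [e] else cur)) := rfl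
    rw [hstep] at h
    by_cases h0 : e = 0
    · rw [if_neg (show ¬(e ≠ 0) from fun hh => hh h0)] at h
      rw [h0, nzw_cons_zero]
      split_ifs at h with hc
      · exact ⟨[], by simpa using hc, List.nil_prefix⟩
      · exact ih cur h
    · rw [if_pos (show e ≠ 0 from h0)] at h
      rw [nzw_cons_ne e rest h0]
      split_ifs at h with hc
      · exact ⟨[e], hc, List.cons_prefix_cons.mpr ⟨rfl, List.nil_prefix⟩⟩
      · obtain ⟨p', hp1, hp2⟩ := ih (cur ++ [e]) h
        exact ⟨e :: p', by simpa using hp1, List.cons_prefix_cons.mpr ⟨rfl, hp2⟩⟩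

-- ----- A's t-loop as a findIdx? -----

def findT (steady : List Int) : List (List Int) → Int → Option Int
  | [], _ => none
  | cfg :: rest, t => if scanA steady cfg [] then some (-t) else findT steady rest (t + 1)

theorem tLoop_eq_findT (steady : List Int) : ∀ (cfgs pre : List (List Int)),
    tLoopA (pre ++ cfgs) steady
        (PySem.List.pyRange (pre.length : Int) ((pre ++ cfgs).length : Int) 1) =
      findT steady cfgs (pre.length : Int) := by
  intro cfgs
  induction cfgs with
  | nil =>
    intro pre
    rw [List.append_nil, PySem.List.pyRange_one_eq_nil (le_refl _)]
    rfl
  | cons cfg rest ih =>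
    intro pre
    rw [PySem.List.pyRange_one_cons (by simp)]
    rw [tLoopA, PySem.List.pyGet?_append_length]
    rw [findT]
    simp only [Option.getD_some]
    by_cases hr : scanA steady cfg [] = true
    · rw [if_pos hr, if_pos hr]
    · rw [if_neg hr, if_neg hr]
      have hpre : ((pre.length : Int) + 1) = (((pre ++ [cfg]).length : Nat) : Int) := by simp
      have hsys : pre ++ cfg :: rest = (pre ++ [cfg]) ++ rest := by simp
      rw [hpre, hsys, ih (pre ++ [cfg])]

theorem findT_eq_findIdx? (steady : List Int) : ∀ (cfgs : List (List Int)) (t0 : Int),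
    findT steady cfgs t0 =
      (cfgs.findIdx? (fun c => scanA steady c [])).map (fun j : Nat => -(t0 + (j : Int))) := by
  intro cfgs
  induction cfgs with
  | nil => intro t0; simp [findT]
  | cons cfg rest ih =>
    intro t0
    rw [findT, List.findIdx?_cons]
    by_cases h : scanA steady cfg [] = true
    · simp [h]
    · rw [if_neg h, if_neg (by simpa using h), ih (t0 + 1)]
      cases hfi : List.findIdx? (fun c => scanA steady c []) rest with
      | none => simp
      | some j =>
        simp only [Option.map_some, Option.some.injEq]
        push_cast
        ring

theorem findIdx?_congr_mem {α : Type} (l : List α) (p q : α → Bool)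
    (h : ∀ x ∈ l, p x = q x) : l.findIdx? p = l.findIdx? q := by
  induction l with
  | nil => rfl
  | cons a rest ih =>
    rw [List.findIdx?_cons, List.findIdx?_cons, h a (by simp),
      ih (fun x hx => h x (by simp [hx]))]

-- ----- B's dictionary build -----

def dB : List (List Int) → Int → PySem.Dict (List Int) Int → PySem.Dict (List Int) Int
  | [], _, d => d
  | u :: us, t, d =>
      dB us (t + 1) (if (PySem.Dict.get? d u).isSome then d else PySem.Dict.insert d u t)

theorem dB_get : ∀ (us : List (List Int)) (t0 : Int) (d : PySem.Dict (List Int) Int)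
    (w : List Int),
    PySem.Dict.get? (dB us t0 d) w =
      (PySem.Dict.get? d w).or
        ((us.findIdx? (fun u => decide (u = w))).map (fun j : Nat => t0 + (j : Int))) := by
  intro us
  induction us with
  | nil => intro t0 d w; simp [dB]
  | cons u rest ih =>
    intro t0 d w
    rw [dB, ih, List.findIdx?_cons]
    by_cases hw : u = w
    · subst hw
      by_cases hsome : (PySem.Dict.get? d u).isSome = true
      · obtain ⟨val, hval⟩ := Option.isSome_iff_exists.mp hsome
        rw [if_pos hsome, hval, Option.some_or, Option.some_or]
      · have hnone : PySem.Dict.get? d u = none := by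
          cases hh : PySem.Dict.get? d u
          · rfl
          · rw [hh] at hsome; simp at hsome
        rw [if_neg hsome, PySem.Dict.get?_insert_self, hnone, Option.some_or, Option.none_or,
          if_pos (by simp)]
        simp
    · have hgd : PySem.Dict.get? (if (PySem.Dict.get? d u).isSome = true then d
          else PySem.Dict.insert d u t0) w = PySem.Dict.get? d w := by
        split_ifs
        · rfl
        · exact PySem.Dict.get?_insert_of_ne d t0 (fun hh => hw hh.symm)
      rw [hgd, if_neg (by simpa using hw)]
      cases hfi : List.findIdx? (fun u => decide (u = w)) rest with
      | none => simp
      | some j =>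
        simp only [Option.map_some]
        congr 2
        push_cast
        ring

theorem dB_snoc (us : List (List Int)) (u : List Int) :
    ∀ (t0 : Int) (d : PySem.Dict (List Int) Int),
    dB (us ++ [u]) t0 d =
      (if (PySem.Dict.get? (dB us t0 d) u).isSome then dB us t0 d
       else PySem.Dict.insert (dB us t0 d) u (t0 + us.length)) := by
  induction us with
  | nil =>
    intro t0 d
    simp [dB]
  | cons x rest ih =>
    intro t0 d
    rw [List.cons_append, dB, dB, ih]
    have harith : t0 + 1 + (rest.length : Int) = t0 + (((x :: rest).length : Nat) : Int) := by
      simp [List.length_cons]; push_cast; ring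
    rw [harith]

-- ----- invariants of the forward iterates and the conjugation identity -----

theorem Bnd_nzw (n : Int) (xs : List Int) (hb : Bnd n xs) : Bnd n (nzw xs) :=
  fun e he => hb e (List.mem_of_mem_filter he)

theorem zit_bnd (n : Int) (z0 : List Int) (hb : Bnd n z0) :
    ∀ k, Bnd n (moveB^[k] z0) := by
  intro k
  induction k with
  | zero => exact hb
  | succ k ih =>
    rw [Function.iterate_succ_apply']
    exact moveB_bnd _ n ih

theorem zit_count (z0 : List Int) (v : Int) (hv : v ≠ 0) :
    ∀ k, (moveB^[k] z0).count v = z0.count v := by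
  intro k
  induction k with
  | zero => rfl
  | succ k ih =>
    rw [Function.iterate_succ_apply', moveB_count _ v hv, ih]

theorem nzwM_eq (xs ys : List Int) (h : ∀ v, v ≠ 0 → xs.count v = ys.count v) :
    ((nzw xs : List Int) : Multiset Int) = ((nzw ys : List Int) : Multiset Int) := by
  ext v
  simp only [Multiset.coe_count]
  by_cases hv : v = 0
  · subst hv
    have h1 : (0 : Int) ∉ nzw xs := fun hmem => by simpa [nzw] using List.of_mem_filter hmem
    have h2 : (0 : Int) ∉ nzw ys := fun hmem => by simpa [nzw] using List.of_mem_filter hmem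
    rw [List.count_eq_zero.mpr h1, List.count_eq_zero.mpr h2]
  · unfold nzw
    have hc : (fun e : Int => decide (e ≠ 0)) v = true := by simpa using hv
    rw [List.count_filter (p := fun e => decide (e ≠ 0)) hc,
        List.count_filter (p := fun e => decide (e ≠ 0)) hc]
    exact h v hv

theorem nzw_length_eq (xs ys : List Int) (h : ∀ v, v ≠ 0 → xs.count v = ys.count v) :
    (nzw xs).length = (nzw ys).length := by
  have := congrArg Multiset.card (nzwM_eq xs ys h)
  simpa using this

theorem fC_n (n : Int) (hn : 0 < n) : fC n n = 1 := by
  unfold fC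
  rw [if_neg (by omega)]
  ring

theorem fC_one (n : Int) (hn : 0 < n) : fC n 1 = n := by
  unfold fC
  rw [if_neg (by omega)]
  ring

theorem one_mem_conj (n : Int) (pi : List Int) (hn : 0 < n) (hmem : n ∈ pi) :
    (1 : Int) ∈ conj n pi := by
  unfold conj
  exact List.mem_map.mpr ⟨n, List.mem_reverse.mpr hmem, fC_n n hn⟩

theorem n_mem_conj (n : Int) (xs : List Int) (hn : 0 < n) (hmem : (1 : Int) ∈ xs) :
    n ∈ conj n xs := by
  unfold conj
  exact List.mem_map.mpr ⟨1, List.mem_reverse.mpr hmem, fC_one n hn⟩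

theorem one_mem_zit (n : Int) (z0 : List Int) (hn : 0 < n) (hmem : (1 : Int) ∈ z0) :
    ∀ k, (1 : Int) ∈ moveB^[k] z0 := by
  intro k
  rw [← List.count_pos_iff]
  rw [zit_count z0 1 one_ne_zero k]
  exact List.count_pos_iff.mpr hmem

theorem max?_conj_zit (n : Int) (z0 : List Int) (hn : 0 < n) (hb : Bnd n z0)
    (hmem : (1 : Int) ∈ z0) (k : Nat) :
    PySem.List.max? (conj n (moveB^[k] z0)) (fun y => y) = some n :=
  max?_value _ n
    (n_mem_conj n _ hn (one_mem_zit n z0 hn hmem k))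
    (fun e he => (conj_bnd n _ (zit_bnd n z0 hb k) e he).2)

theorem bmA_it (n : Int) (pi : List Int) (hn : 0 < n) (hb : Bnd n pi) (hmem : n ∈ pi) :
    ∀ k, bmA^[k] pi = conj n (moveB^[k] (conj n pi)) := by
  have hbz0 : Bnd n (conj n pi) := conj_bnd n pi hb
  have h1z0 : (1 : Int) ∈ conj n pi := one_mem_conj n pi hn hmem
  intro k
  induction k with
  | zero => exact (conj_conj n pi hb).symm
  | succ k ih =>
    rw [Function.iterate_succ_apply', ih, bmA_eq,
      max?_conj_zit n (conj n pi) hn hbz0 h1z0 k]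
    dsimp only
    rw [conj_conj n _ (zit_bnd n (conj n pi) hbz0 k), Function.iterate_succ_apply']

-- ----- the hit condition, word-level -----

theorem scanA_iff (n : Int) (z0 : List Int) (hn : 0 < n) (hb : Bnd n z0)
    (hmem : (1 : Int) ∈ z0) (k N : Nat) :
    scanA ((nzw (moveB^[N] z0)).reverse.map (fC n)) (conj n (moveB^[k] z0)) [] = true ↔
      nzw (moveB^[k] z0) = nzw (moveB^[N] z0) := by
  have hbk : Bnd n (moveB^[k] z0) := zit_bnd n z0 hb k
  have hbN : Bnd n (moveB^[N] z0) := zit_bnd n z0 hb N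
  have hcnt : ∀ v, v ≠ 0 → (moveB^[k] z0).count v = (moveB^[N] z0).count v := by
    intro v hv
    rw [zit_count z0 v hv, zit_count z0 v hv]
  have hne : conj n (moveB^[k] z0) ≠ [] := by
    have h1 : (1 : Int) ∈ moveB^[k] z0 := one_mem_zit n z0 hn hmem k
    have : n ∈ conj n (moveB^[k] z0) := n_mem_conj n _ hn h1
    exact List.ne_nil_of_mem this
  have hnzc : nzw (conj n (moveB^[k] z0)) = (nzw (moveB^[k] z0)).reverse.map (fC n) :=
    nzw_conj n _ hbk
  constructor
  · intro h
    obtain ⟨p, hp1, hp2⟩ := scanA_prefix _ _ [] h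
    rw [List.nil_append] at hp1
    subst hp1
    have hlen : ((nzw (moveB^[N] z0)).reverse.map (fC n)).length =
        (nzw (conj n (moveB^[k] z0))).length := by
      rw [hnzc]
      simp only [List.length_map, List.length_reverse]
      exact (nzw_length_eq _ _ (fun v hv => (hcnt v hv).symm))
    have heq := List.IsPrefix.eq_of_length hp2 hlen
    rw [hnzc] at heq
    have h1 : conj n (nzw (moveB^[N] z0)) = conj n (nzw (moveB^[k] z0)) := heq
    have h2 := congrArg (conj n) h1
    rw [conj_conj n _ (Bnd_nzw n _ hbN), conj_conj n _ (Bnd_nzw n _ hbk)] at h2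
    exact h2.symm
  · intro h
    have hsteady : (nzw (moveB^[N] z0)).reverse.map (fC n) = nzw (conj n (moveB^[k] z0)) := by
      rw [hnzc, h]
    rw [hsteady]
    have := scanA_hit (conj n (moveB^[k] z0)) [] hne
    simpa using this

-- ----- B's fold characterized -----

def wcF (z0 : List Int) : Nat → List Int
  | 0 => []
  | M + 1 => nzw (moveB^[M] z0)

def wsF (z0 : List Int) (M : Nat) : List (List Int) :=
  (List.range M).map (fun k => nzw (moveB^[k] z0))

theorem B_fold (n : Int) (z0 : List Int) (N : Nat) (hn : n = (N : Int)) :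
    ∀ M : Nat, M ≤ N →
    ((PySem.List.pyRange 0 (M : Int) 1).foldl
      (fun (s : List Int × PySem.Dict (List Int) Int × List Int) t =>
        let w := s.1.filter (fun e => decide (e ≠ 0))
        let d := if (PySem.Dict.get? s.2.1 w).isSome then s.2.1
                 else PySem.Dict.insert s.2.1 w t
        let z := if t < n then moveB s.1 else s.1
        (z, d, w))
      (z0, PySem.Dict.empty, [])) =
    (moveB^[M] z0, dB (wsF z0 M) 0 PySem.Dict.empty, wcF z0 M) := by
  intro M
  induction M with
  | zero =>
    intro _
    simp [PySem.List.pyRange_one_eq_nil, wsF, dB, wcF]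
  | succ M ih =>
    intro hM
    rw [show ((M + 1 : Nat) : Int) = (M : Int) + 1 by push_cast; ring,
      PySem.List.pyRange_one_succ_right (by positivity), List.foldl_append]
    rw [ih (by omega)]
    dsimp only [List.foldl]
    have hw : (moveB^[M] z0).filter (fun e => decide (e ≠ 0)) = nzw (moveB^[M] z0) := rfl
    have hws : wsF z0 (M + 1) = wsF z0 M ++ [nzw (moveB^[M] z0)] := by
      unfold wsF
      rw [List.range_succ, List.map_append]
      rfl
    rw [hw, hws, dB_snoc]
    have hlen : ((0 : Int) + ((wsF z0 M).length : Int)) = (M : Int) := by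
      unfold wsF
      simp
    rw [hlen]
    have hguard : (M : Int) < n := by
      rw [hn]
      exact_mod_cast Nat.lt_of_lt_of_le (Nat.lt_succ_self M) hM
    rw [if_pos hguard]
    rw [← Function.iterate_succ_apply' moveB M z0]
    rfl

-- the one extra fold step at t = N (guard t < n is false there)
theorem B_fold_last (N : Nat) (z0 : List Int) :
    ((PySem.List.pyRange 0 ((N : Int) + 1) 1).foldl
      (fun (s : List Int × PySem.Dict (List Int) Int × List Int) t =>
        let w := s.1.filter (fun e => decide (e ≠ 0))
        let d := if (PySem.Dict.get? s.2.1 w).isSome then s.2.1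
                 else PySem.Dict.insert s.2.1 w t
        let z := if t < (N : Int) then moveB s.1 else s.1
        (z, d, w))
      (z0, PySem.Dict.empty, [])) =
    (moveB^[N] z0, dB (wsF z0 (N + 1)) 0 PySem.Dict.empty, nzw (moveB^[N] z0)) := by
  rw [PySem.List.pyRange_one_succ_right (by positivity), List.foldl_append,
    B_fold (N : Int) z0 N rfl N (le_refl N)]
  dsimp only [List.foldl]
  have hws : wsF z0 (N + 1) = wsF z0 N ++ [nzw (moveB^[N] z0)] := by
    unfold wsF
    rw [List.range_succ, List.map_append]
    rfl
  rw [hws, dB_snoc]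
  have hlen : ((0 : Int) + ((wsF z0 N).length : Int)) = (N : Int) := by
    unfold wsF
    simp
  rw [hlen, if_neg (lt_irrefl _)]
  rfl

-- ===== VERDICT (by name: the statement is the Claim_ definition above) =====
theorem backward_ss_spec : Claim_equal_backward_ss := by
  intro pi _ hpre
  obtain ⟨hne, hex, hsign, -⟩ := hpre
  unfold Spec_backward_ss backward_ss backward_ss_alt
  cases hmax : PySem.List.max? pi (fun y => y) with
  | none => rfl
  | some n =>
    dsimp only
    have hn0 : 0 ≤ n := by
      obtain ⟨e, he, he0⟩ := hex
      exact le_trans he0 (PySem.List.max?_isMax hmax e he)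
    by_cases hn : 0 < n
    · -- n ≥ 1 : conjugation + word search
      obtain ⟨N, rfl⟩ : ∃ N : Nat, n = (N : Int) := ⟨n.toNat, (Int.toNat_of_nonneg hn0).symm⟩
      have hmemn : ((N : Int)) ∈ pi := PySem.List.max?_mem hmax
      have hball : ∀ e ∈ pi, 0 ≤ e := hsign ⟨(N : Int), hmemn, hn⟩
      have hbnd : Bnd (N : Int) pi :=
        fun e he => ⟨hball e he, PySem.List.max?_isMax hmax e he⟩
      have hbz0 : Bnd (N : Int) (conj (N : Int) pi) := conj_bnd _ pi hbnd
      have h1z0 : (1 : Int) ∈ conj (N : Int) pi := one_mem_conj _ pi hn hmemn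
      have hz0 : pi.reverse.map (fun e => if e = 0 then e else (N : Int) + 1 - e) =
          conj (N : Int) pi := rfl
      have hbbs : bbsA pi (-(N : Int)) = itListA pi N := by
        unfold bbsA
        rw [if_neg (by omega), neg_neg]
        exact sysA_fold pi N
      rw [hbbs, hz0, B_fold_last N (conj (N : Int) pi)]
      dsimp only
      have hsrc : (PySem.List.pyGet? (itListA pi N) ((N : Int))).getD [] = bmA^[N] pi := by
        rw [PySem.List.pyGet?_natCast, itListA_get]
        rfl
      rw [hsrc]
      rw [PySem.List.foldl_append_ite_eq_filter (fun e => e ≠ 0) (bmA^[N] pi) [],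
        List.nil_append]
      have hsteady : (bmA^[N] pi).filter (fun x => decide (x ≠ 0)) =
          (nzw (moveB^[N] (conj (N : Int) pi))).reverse.map (fC (N : Int)) := by
        have h1 : (bmA^[N] pi).filter (fun x => decide (x ≠ 0)) =
            nzw (bmA^[N] pi) := rfl
        rw [h1, bmA_it (N : Int) pi hn hbnd hmemn N,
          nzw_conj _ _ (zit_bnd _ _ hbz0 N)]
      rw [hsteady]
      -- A's loop as a findIdx? over the time range
      have hfind := tLoop_eq_findT
        ((nzw (moveB^[N] (conj (N : Int) pi))).reverse.map (fC (N : Int))) (itListA pi N) []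
      simp only [List.nil_append, List.length_nil, Nat.cast_zero] at hfind
      have hrange : PySem.List.pyRange 0 ((N : Int) + 1) 1 =
          PySem.List.pyRange 0 (((itListA pi N).length : Nat) : Int) 1 := by
        rw [itListA_length]
        push_cast
        ring_nf
      rw [hrange, hfind, findT_eq_findIdx?]
      have hmap : itListA pi N = (List.range (N + 1)).map (fun k => bmA^[k] pi) := rfl
      rw [hmap, List.findIdx?_map]
      -- B's dictionary lookup as a findIdx? over the same range
      rw [dB_get, PySem.Dict.get?_empty, Option.none_or]
      have hmap2 : wsF (conj (N : Int) pi) (N + 1) =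
          (List.range (N + 1)).map (fun k => nzw (moveB^[k] (conj (N : Int) pi))) := rfl
      rw [hmap2, List.findIdx?_map]
      -- the two predicates agree on the range
      have hcongr := findIdx?_congr_mem (List.range (N + 1))
        ((fun c => scanA ((nzw (moveB^[N] (conj (N : Int) pi))).reverse.map (fC (N : Int)))
            c []) ∘ (fun k => bmA^[k] pi))
        ((fun u => decide (u = nzw (moveB^[N] (conj (N : Int) pi)))) ∘
          (fun k => nzw (moveB^[k] (conj (N : Int) pi))))
        (by
          intro k _
          simp only [Function.comp_apply]
          rw [bmA_it (N : Int) pi hn hbnd hmemn k]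
          have hiff := scanA_iff (N : Int) (conj (N : Int) pi) hn hbz0 h1z0 k N
          by_cases hd : nzw (moveB^[k] (conj (N : Int) pi)) =
              nzw (moveB^[N] (conj (N : Int) pi))
          · rw [hiff.mpr hd]
            simp [hd]
          · have hnot : scanA _ _ [] ≠ true := fun hs => hd (hiff.mp hs)
            cases hs : scanA ((nzw (moveB^[N] (conj (N : Int) pi))).reverse.map
                (fC (N : Int))) (conj (N : Int) (moveB^[k] (conj (N : Int) pi))) []
            · simp [hd]
            · exact absurd hs hnot)
      rw [hcongr]
      -- the search succeeds (at time N at the latest)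
      have hsome : (((List.range (N + 1)).findIdx?
          ((fun u => decide (u = nzw (moveB^[N] (conj (N : Int) pi)))) ∘
            (fun k => nzw (moveB^[k] (conj (N : Int) pi)))))).isSome = true := by
        rw [List.findIdx?_isSome]
        refine List.any_eq_true.mpr ⟨N, List.mem_range.mpr (Nat.lt_succ_self N), ?_⟩
        simp
      obtain ⟨j, hj⟩ := Option.isSome_iff_exists.mp hsome
      rw [hj]
      rfl
    · -- n = 0 : a single configuration, both sides return 0
      have hz : n = 0 := by omega
      subst hz
      have hsys : bbsA pi (-(0 : Int)) = [pi] := by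
        unfold bbsA
        rw [if_pos (by norm_num), show -(0 : Int) = (0 : Int) by norm_num,
          PySem.List.pyRange_one_eq_nil (le_refl 0)]
        rfl
      rw [hsys]
      have hget0 : (PySem.List.pyGet? [pi] ((0 : Int))).getD [] = pi := by
        rw [show (0 : Int) = ((0 : Nat) : Int) from rfl, PySem.List.pyGet?_natCast]
        rfl
      rw [hget0]
      rw [PySem.List.foldl_append_ite_eq_filter (fun e => e ≠ 0) pi [], List.nil_append]
      have hrange : PySem.List.pyRange 0 ((0 : Int) + 1) 1 = [(0 : Int)] := by
        rw [show ((0 : Int) + 1) = (1 : Int) by norm_num,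
          PySem.List.pyRange_one_cons (by norm_num),
          PySem.List.pyRange_one_eq_nil (by norm_num)]
      rw [hrange]
      have hscan : scanA (pi.filter (fun x => decide (x ≠ 0))) pi [] = true := by
        have h2 : pi.filter (fun x => decide (x ≠ 0)) = nzw pi := rfl
        rw [h2]
        simpa using scanA_hit pi [] hne
      rw [tLoopA, hget0]
      rw [if_pos hscan]
      dsimp only [List.foldl]
      simp [PySem.Dict.get?_empty, PySem.Dict.get?_insert_self]
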